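-- pv_equiv track=rewrite | github.com/wherby/code | algorithm/questions/number-of-beautiful-partitions/reverseOrderOfDp.py | beautifulPartitions
-- ===== SOURCE A (Python) =====
-- def beautifulPartitions(s: str, k: int, minLength: int) -> int:
--     primes = set(["2","3","5","7"])
--     n = len(s)
--     if s[0] not in primes: return 0
--     mod = 10**9+7
--     f,g = [[0]*(k+1) for _ in range(n+1)],[[0]*(k+1) for _ in range(n+1)]
--     f[0][0],g[0][0] =1,1
--     for i in range(1,n+1):
--         if i >=minLength and s[i-1] not in primes and (i == n or s[i] in primes):
--             for j in range(1,k+1):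
--                 f[i][j] = g[i-minLength][j-1]
--         for j in range(k+1):
--             g[i][j] = (g[i-1][j] + f[i][j]) % mod
--     return f[n][k]
-- ===== SOURCE B (Python) =====
-- def beautifulPartitions(s: str, k: int, minLength: int) -> int:
--     primes = "2357"
--     n = len(s)
--     if n == 0 or s[0] not in primes:
--         return 0
--     mod = 10 ** 9 + 7
--     f = [[0] * (k + 1) for _ in range(n + 1)]
--     f[0][0] = 1
--     for i in range(1, n + 1):
--         if i >= minLength and s[i - 1] not in primes and (i == n or s[i] in primes):
--             for j in range(1, k + 1):
--                 f[i][j] = sum(f[t][j - 1] for t in range(0, i - minLength + 1)) % mod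
--     return f[n][k]
-- ===== Notes on version B (the rewrite author's own statement) =====
-- stated objective: simpler
-- what changed: B drops A's prefix-sum table g entirely and computes each DP entry by directly summing f[t][j-1] over all eligible earlier part-ends t, a plain naive DP with one table.
-- outside the precondition, e.g. on beautifulPartitions('20', 1, 0): A returns 0, B returns 1
import Mathlib
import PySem

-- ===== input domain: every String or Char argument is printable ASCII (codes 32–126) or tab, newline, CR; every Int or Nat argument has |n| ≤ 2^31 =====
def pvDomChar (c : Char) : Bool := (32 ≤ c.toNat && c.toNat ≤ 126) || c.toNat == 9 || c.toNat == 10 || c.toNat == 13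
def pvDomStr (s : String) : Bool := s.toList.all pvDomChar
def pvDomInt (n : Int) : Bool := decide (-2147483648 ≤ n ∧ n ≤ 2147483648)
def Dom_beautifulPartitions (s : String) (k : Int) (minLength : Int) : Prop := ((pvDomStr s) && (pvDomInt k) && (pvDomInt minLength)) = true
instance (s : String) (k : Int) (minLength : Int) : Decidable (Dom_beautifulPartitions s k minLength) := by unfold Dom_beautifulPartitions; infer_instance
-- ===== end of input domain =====

-- B (beautifulPartitions_alt) drops A's prefix-sum table g and computes each DP entry by directly
-- summing over all eligible earlier part-ends: simpler one-table DP, same return value on Pre_.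

-- shared helpers (each port uses them exactly as its Python does)
def pvPrime (c : Char) : Bool := c == '2' || c == '3' || c == '5' || c == '7'
def pvChAt (cs : List Char) (i : Int) : Char := PySem.List.pyGetD cs i ' '
def pvGetI (xs : List Int) (i : Int) : Int := PySem.List.pyGetD xs i 0
def pvGetR (xss : List (List Int)) (i : Int) : List Int := PySem.List.pyGetD xss i []
-- the shared validity test: i >= minLength and s[i-1] not in primes and (i == n or s[i] in primes)
def pvValid (cs : List Char) (minLength i : Int) : Bool :=
  minLength ≤ i && !pvPrime (pvChAt cs (i-1)) && (i == (cs.length : Int) || pvPrime (pvChAt cs i))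
-- row 0 of the table: [0]*(k+1) with [0] set to 1
def pvRow0 (k : Int) : List Int := (List.replicate (k+1).toNat 0).set 0 1
def pvMod : Int := 1000000007

-- ===== PORT A =====
-- one iteration of A's i-loop: state = the two tables (f, g), rows appended as Python assigns them
def pvStepA (cs : List Char) (k minLength : Int)
    (fg : List (List Int) × List (List Int)) (i : Int) : List (List Int) × List (List Int) :=
  let frow : List Int :=
    if pvValid cs minLength i then
      (PySem.List.pyRange 0 (k+1)).map (fun j => if 1 ≤ j then pvGetI (pvGetR fg.2 (i - minLength)) (j-1) else 0)
    else List.replicate (k+1).toNat 0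
  let grow : List Int :=
    (PySem.List.pyRange 0 (k+1)).map (fun j => PySem.Int.mod (pvGetI (pvGetR fg.2 (i-1)) j + pvGetI frow j) pvMod)
  (fg.1 ++ [frow], fg.2 ++ [grow])

def beautifulPartitions (s : String) (k : Int) (minLength : Int) : Int :=
  let cs := s.toList
  let n : Int := cs.length
  match cs with
  | [] => 0  -- Python raises IndexError on s[0] here (excluded by Pre_)
  | c0 :: _ =>
    if pvPrime c0 then
      let fg := (PySem.List.pyRange 1 (n+1)).foldl (pvStepA cs k minLength) ([pvRow0 k], [pvRow0 k])
      pvGetI (pvGetR fg.1 n) k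
    else 0

-- ===== PORT B =====
-- sum(f[t][j] for t in range(0, p+1))
def pvSumF (f : List (List Int)) (p j : Int) : Int :=
  (PySem.List.pyRange 0 (p+1)).foldl (fun acc t => acc + pvGetI (pvGetR f t) j) 0

-- one iteration of B's i-loop: state = the single table f
def pvStepB (cs : List Char) (k minLength : Int) (f : List (List Int)) (i : Int) : List (List Int) :=
  let frow : List Int :=
    if pvValid cs minLength i then
      (PySem.List.pyRange 0 (k+1)).map
        (fun j => if 1 ≤ j then PySem.Int.mod (pvSumF f (i - minLength) (j-1)) pvMod else 0)
    else List.replicate (k+1).toNat 0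
  f ++ [frow]

def beautifulPartitions_alt (s : String) (k : Int) (minLength : Int) : Int :=
  let cs := s.toList
  let n : Int := cs.length
  if cs.isEmpty then 0
  else if pvPrime (pvChAt cs 0) then
    let f := (PySem.List.pyRange 1 (n+1)).foldl (pvStepB cs k minLength) [pvRow0 k]
    pvGetI (pvGetR f n) k
  else 0

-- ===== PRECONDITION & SPEC =====
-- Pre_ restricts to A's natural domain: s nonempty (A raises IndexError on "") and, when s starts
-- with a prime digit, k ≥ 0 (for k < 0 A raises IndexError on its empty table rows) and
-- minLength ≥ 1 (a part length ≤ 0 is outside the natural domain: A then reads not-yet-updated or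
-- out-of-range table rows, returning 0 or raising IndexError).
def Pre_beautifulPartitions (s : String) (k : Int) (minLength : Int) : Prop :=
  s.toList ≠ [] ∧ (pvPrime (pvChAt s.toList 0) = true → 0 ≤ k ∧ 1 ≤ minLength)
instance (s : String) (k : Int) (minLength : Int) : Decidable (Pre_beautifulPartitions s k minLength) := by
  unfold Pre_beautifulPartitions; infer_instance

def pvWitness_beautifulPartitions : String × Int × Int := ("20", 1, 1)

def Spec_beautifulPartitions (s : String) (k : Int) (minLength : Int) (out : Int) : Prop := out = beautifulPartitions_alt s k minLength
instance (s : String) (k : Int) (minLength : Int) (out : Int) : Decidable (Spec_beautifulPartitions s k minLength out) := by unfold Spec_beautifulPartitions; infer_instance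

-- ===== CLAIM (what is proved, stated in full; the proofs are below) =====
def Claim_equal_beautifulPartitions : Prop := ∀ (s : String) (k : Int) (minLength : Int), Dom_beautifulPartitions s k minLength → Pre_beautifulPartitions s k minLength → Spec_beautifulPartitions s k minLength (beautifulPartitions s k minLength)

-- ===== LEMMAS AND PROOFS =====

-- the two folds after N iterations (proof-only abbreviations)
def pvFA (cs : List Char) (k m : Int) (N : Nat) : List (List Int) × List (List Int) :=
  (PySem.List.pyRange 1 ((N : Int)+1)).foldl (pvStepA cs k m) ([pvRow0 k], [pvRow0 k])
def pvFB (cs : List Char) (k m : Int) (N : Nat) : List (List Int) :=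
  (PySem.List.pyRange 1 ((N : Int)+1)).foldl (pvStepB cs k m) [pvRow0 k]

theorem pvGetR_append_lt (xss : List (List Int)) (row : List Int) (t : Int)
    (h0 : 0 ≤ t) (h : t < (xss.length : Int)) : pvGetR (xss ++ [row]) t = pvGetR xss t := by
  obtain ⟨u, rfl⟩ : ∃ u : Nat, (u : Int) = t := ⟨t.toNat, Int.toNat_of_nonneg h0⟩
  simp only [pvGetR, PySem.List.pyGetD_natCast]
  exact List.getD_append _ _ _ u (by exact_mod_cast h)

theorem pvGetR_append_self (xss : List (List Int)) (row : List Int) :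
    pvGetR (xss ++ [row]) (xss.length : Int) = row := by
  simp [pvGetR, PySem.List.pyGetD_natCast, List.getD]

theorem pvSumF_append (f : List (List Int)) (row : List Int) (p j : Int)
    (h : p < (f.length : Int)) : pvSumF (f ++ [row]) p j = pvSumF f p j := by
  apply PySem.List.foldl_congr_mem
  intro acc t ht
  rw [PySem.List.mem_pyRange_one] at ht
  rw [pvGetR_append_lt _ _ _ ht.1 (by omega)]

theorem pvSumF_succ (f : List (List Int)) (N : Nat) (j : Int) :
    pvSumF f ((N : Int) + 1) j = pvSumF f (N : Int) j + pvGetI (pvGetR f ((N : Int) + 1)) j := by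
  unfold pvSumF
  rw [PySem.List.pyRange_one_succ_right (by omega : (0:Int) ≤ (N : Int) + 1), List.foldl_append]
  rfl

theorem pvRow0_getElem (k : Int) (t : Nat) (h : t < (pvRow0 k).length) :
    (pvRow0 k)[t] = if t = 0 then (1:Int) else 0 := by
  simp only [pvRow0] at h ⊢
  rcases Nat.eq_zero_or_pos t with rfl | ht
  · simp
  · rw [List.getElem_set_ne (by omega)]
    simp [Nat.ne_of_gt ht]

theorem pvRow0_get (k : Int) (t : Nat) (h : t < (k+1).toNat) :
    pvGetI (pvRow0 k) (t : Int) = if t = 0 then (1:Int) else 0 := by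
  have hlen : t < (pvRow0 k).length := by simpa [pvRow0] using h
  rw [pvGetI, PySem.List.pyGetD_natCast, List.getD_eq_getElem _ _ hlen, pvRow0_getElem k t hlen]

theorem pvMod_pos : (0:Int) < pvMod := by norm_num [pvMod]

-- row 0 already satisfies the prefix-sum-mod characterisation
theorem pvRow0_char (k : Int) (hk : 0 ≤ k) :
    pvRow0 k = (PySem.List.pyRange 0 (k+1)).map
      (fun j => PySem.Int.mod (pvSumF [pvRow0 k] 0 j) pvMod) := by
  have hsum : ∀ j : Int, pvSumF [pvRow0 k] 0 j = pvGetI (pvRow0 k) j := by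
    intro j
    unfold pvSumF
    rw [show (0:Int)+1 = 1 by ring, show PySem.List.pyRange 0 1 = [0] from by decide]
    show 0 + pvGetI (pvGetR [pvRow0 k] 0) j = pvGetI (pvRow0 k) j
    simp only [pvGetR, PySem.List.pyGetD_zero_cons, zero_add]
  have hK : ((k+1).toNat : Int) = k + 1 := by omega
  have hrange := PySem.List.pyRange_zero_natCast (k+1).toNat
  rw [hK] at hrange
  rw [hrange, List.map_map]
  apply List.ext_getElem
  · simp [pvRow0]
  · intro t h1 h2
    simp only [List.getElem_map, List.getElem_range, Function.comp]
    rw [hsum, pvRow0_get k t (by simpa [pvRow0] using h1), pvRow0_getElem k t h1]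
    rcases Nat.eq_zero_or_pos t with rfl | ht
    · simp
      decide
    · simp [Nat.ne_of_gt ht]
      decide

-- the main invariant of the two loops
theorem pvInv (cs : List Char) (k m : Int) (hk : 0 ≤ k) (hm : 1 ≤ m) (N : Nat) :
    (pvFA cs k m N).1 = pvFB cs k m N ∧
    (pvFB cs k m N).length = N + 1 ∧
    (pvFA cs k m N).2.length = N + 1 ∧
    ∀ p : Nat, p ≤ N →
      pvGetR (pvFA cs k m N).2 (p : Int) =
        (PySem.List.pyRange 0 (k+1)).map
          (fun j => PySem.Int.mod (pvSumF (pvFB cs k m N) (p : Int) j) pvMod) := by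
  induction N with
  | zero =>
    have h0 : PySem.List.pyRange 1 ((0:Int)+1) = [] := by decide
    refine ⟨by simp [pvFA, pvFB], by simp [pvFB], by simp [pvFA], ?_⟩
    intro p hp
    interval_cases p
    simp only [pvFA, pvFB, Nat.cast_zero, h0, List.foldl_nil]
    rw [show pvGetR [pvRow0 k] 0 = pvRow0 k from by
      simp [pvGetR, PySem.List.pyGetD_zero_cons]]
    exact pvRow0_char k hk
  | succ N ih =>
    obtain ⟨h1, h2, h3, h4⟩ := ih
    have hi : ((N+1 : Nat) : Int) = (N : Int) + 1 := by push_cast; ring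
    have hstep : PySem.List.pyRange 1 (((N+1:Nat) : Int)+1)
        = PySem.List.pyRange 1 ((N : Int)+1) ++ [(N : Int)+1] := by
      rw [hi, PySem.List.pyRange_one_succ_right (by omega : (1:Int) ≤ (N : Int)+1)]
    set fA := (pvFA cs k m N).1 with hfA
    set gA := (pvFA cs k m N).2 with hgA
    set fB := pvFB cs k m N with hfB
    set i : Int := (N : Int) + 1 with hidef
    set frowA : List Int :=
      (if pvValid cs m i then
        (PySem.List.pyRange 0 (k+1)).map (fun j => if 1 ≤ j then pvGetI (pvGetR gA (i - m)) (j-1) else 0)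
       else List.replicate (k+1).toNat 0) with hfrowA
    set frowB : List Int :=
      (if pvValid cs m i then
        (PySem.List.pyRange 0 (k+1)).map
          (fun j => if 1 ≤ j then PySem.Int.mod (pvSumF fB (i - m) (j-1)) pvMod else 0)
       else List.replicate (k+1).toNat 0) with hfrowB
    set growA : List Int :=
      (PySem.List.pyRange 0 (k+1)).map
        (fun j => PySem.Int.mod (pvGetI (pvGetR gA (i-1)) j + pvGetI frowA j) pvMod) with hgrowA
    have hFA : pvFA cs k m (N+1) = (fA ++ [frowA], gA ++ [growA]) := by
      simp only [pvFA, hstep, List.foldl_append, List.foldl_cons, List.foldl_nil]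
      rfl
    have hFB : pvFB cs k m (N+1) = fB ++ [frowB] := by
      simp only [pvFB, hstep, List.foldl_append, List.foldl_cons, List.foldl_nil]
      rfl
    -- the appended f-rows agree
    have hrow : frowA = frowB := by
      rw [hfrowA, hfrowB]
      by_cases hv : pvValid cs m i = true
      · rw [if_pos hv, if_pos hv]
        have hmi : m ≤ i := by
          unfold pvValid at hv
          simp only [Bool.and_eq_true, decide_eq_true_eq] at hv
          exact hv.1.1
        obtain ⟨p, hp⟩ : ∃ p : Nat, (p : Int) = i - m := ⟨(i-m).toNat, Int.toNat_of_nonneg (by omega)⟩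
        have hg := h4 p (by omega)
        rw [hp] at hg
        apply List.map_congr_left
        intro j hj
        rw [PySem.List.mem_pyRange_one] at hj
        by_cases hj1 : 1 ≤ j
        · rw [if_pos hj1, if_pos hj1, hg, pvGetI,
            PySem.List.pyGetD_map_pyRange_of_nonneg _ _ _ _ (by omega) (by omega)]
        · rw [if_neg hj1, if_neg hj1]
      · rw [if_neg hv, if_neg hv]
    refine ⟨?_, ?_, ?_, ?_⟩
    · rw [hFA, hFB, h1, hrow]
    · rw [hFB]; simp [h2]
    · rw [hFA]; simp [h3]
    · intro p hp
      rw [hFA, hFB]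
      rcases Nat.lt_or_ge p (N+1) with hplt | hpge
      · -- old rows are untouched
        rw [pvGetR_append_lt _ _ _ (by omega) (by rw [h3]; exact_mod_cast hplt)]
        rw [h4 p (by omega)]
        apply List.map_congr_left
        intro j _
        rw [pvSumF_append _ _ _ _ (by rw [h2]; exact_mod_cast by omega : (p:Int) < (fB.length : Int))]
      · -- the new row p = N+1
        have hpe : p = N + 1 := by omega
        subst hpe
        have hlen : ((N+1:Nat) : Int) = (gA.length : Int) := by rw [h3]
        have hL : pvGetR (gA ++ [growA]) ((N+1:Nat) : Int) = growA := by
          rw [hlen]; exact pvGetR_append_self _ _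
        rw [hL, hgrowA]
        apply List.map_congr_left
        intro j hj
        rw [PySem.List.mem_pyRange_one] at hj
        have hgN := h4 N (le_refl N)
        have hgprev : pvGetI (pvGetR gA (i - 1)) j = PySem.Int.mod (pvSumF fB (N : Int) j) pvMod := by
          rw [show i - 1 = (N : Int) by omega, hgN, pvGetI,
            PySem.List.pyGetD_map_pyRange_of_nonneg _ _ _ _ (by omega) (by omega)]
        have hBlen : ((N : Int) + 1) = ((fB.length : Int)) := by rw [h2]; push_cast; ring
        have hsum : pvSumF (fB ++ [frowB]) ((N+1:Nat) : Int) j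
            = pvSumF fB (N : Int) j + pvGetI frowB j := by
          rw [hi, hidef, pvSumF_succ, pvSumF_append _ _ _ _ (by omega),
            hBlen, pvGetR_append_self]
        rw [hgprev, hrow, hsum]
        simp only [PySem.Int.mod_eq_emod_of_pos pvMod_pos]
        simp only [pvMod]
        omega

-- ===== VERDICT (by name: the statement is the Claim_ definition above) =====
theorem beautifulPartitions_spec : Claim_equal_beautifulPartitions := by
  intro s k m _ hPre
  obtain ⟨hne, hp⟩ := hPre
  unfold Spec_beautifulPartitions beautifulPartitions beautifulPartitions_alt
  rcases hcs : s.toList with _ | ⟨c0, rest⟩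
  · exact absurd hcs hne
  ·
    have hch : pvChAt (c0 :: rest) 0 = c0 := by
      simp [pvChAt, PySem.List.pyGetD_zero_cons]
    by_cases hpr : pvPrime c0 = true
    · obtain ⟨hk, hm⟩ := hp (by rw [hcs, hch]; exact hpr)
      obtain ⟨h1, -, -, -⟩ := pvInv (c0 :: rest) k m hk hm (c0 :: rest).length
      simp only [List.isEmpty_cons, hch, hpr, if_true, Bool.false_eq_true, if_false]
      show pvGetI (pvGetR (pvFA (c0 :: rest) k m (c0 :: rest).length).1 ((c0 :: rest).length : Int)) k
        = pvGetI (pvGetR (pvFB (c0 :: rest) k m (c0 :: rest).length) ((c0 :: rest).length : Int)) k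
      rw [h1]
    · simp [hch, hpr]
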